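-- pv_equiv track=rewrite | github.com/Its-Basix/Password-Security-Checker | main.py | entropy_size
-- ===== SOURCE A (Python) =====
-- def entropy_size(password):
--     entropy = 0
--     if any(c.islower() for c in password):
--         entropy += 26
--     if any(c.isupper() for c in password):
--         entropy += 26
--     if any(c.isdigit() for c in password):
--         entropy += 10
--     if any(not c.isalnum() for c in password):
--         entropy += 32
--     return entropy
-- ===== SOURCE B (Python) =====
-- def entropy_size(password):
--     has_lower = has_upper = has_digit = has_other = False
--     for c in password:
--         if c.islower():
--             has_lower = True
--         if c.isupper():
--             has_upper = True
--         if c.isdigit():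
--             has_digit = True
--         if not c.isalnum():
--             has_other = True
--     total = 0
--     if has_lower:
--         total += 26
--     if has_upper:
--         total += 26
--     if has_digit:
--         total += 10
--     if has_other:
--         total += 32
--     return total
-- ===== Notes on version B (the rewrite author's own statement) =====
-- stated objective: alternative
-- what changed: Replaces A's four independent any()-scans of the password with one pass that accumulates four category flags and sums the weights afterwards.
import Mathlib
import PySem

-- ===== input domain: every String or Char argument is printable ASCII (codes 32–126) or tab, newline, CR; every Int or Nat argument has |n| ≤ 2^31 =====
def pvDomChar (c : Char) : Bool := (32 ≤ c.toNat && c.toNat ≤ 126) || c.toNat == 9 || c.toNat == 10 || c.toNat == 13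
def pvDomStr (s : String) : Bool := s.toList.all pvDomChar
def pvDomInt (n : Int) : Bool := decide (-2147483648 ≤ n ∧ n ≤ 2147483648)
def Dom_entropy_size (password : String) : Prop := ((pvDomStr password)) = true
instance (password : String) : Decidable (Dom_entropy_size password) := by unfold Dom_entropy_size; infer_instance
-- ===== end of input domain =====

-- B changes the decomposition: one pass accumulating four category flags instead of A's four any()-scans (alternative, same cost).

-- ===== PORT A =====
def entropy_size (password : String) : Int :=
  let entropy : Int := 0
  let entropy := if password.toList.any (fun c => PySem.Chars.islower c) then entropy + 26 else entropy
  let entropy := if password.toList.any (fun c => PySem.Chars.isupper c) then entropy + 26 else entropy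
  let entropy := if password.toList.any (fun c => PySem.Chars.isdigit c) then entropy + 10 else entropy
  let entropy := if password.toList.any (fun c => !PySem.Chars.isalnum c) then entropy + 32 else entropy
  entropy

-- ===== PORT B =====
-- loop body of B: update the four category flags for one character
def stepFlags (st : Bool × Bool × Bool × Bool) (c : Char) : Bool × Bool × Bool × Bool :=
  let st := if PySem.Chars.islower c then (true, st.2.1, st.2.2.1, st.2.2.2) else st
  let st := if PySem.Chars.isupper c then (st.1, true, st.2.2.1, st.2.2.2) else st
  let st := if PySem.Chars.isdigit c then (st.1, st.2.1, true, st.2.2.2) else st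
  let st := if !PySem.Chars.isalnum c then (st.1, st.2.1, st.2.2.1, true) else st
  st

def entropy_size_alt (password : String) : Int :=
  let flags := password.toList.foldl stepFlags (false, false, false, false)
  let total : Int := 0
  let total := if flags.1 then total + 26 else total
  let total := if flags.2.1 then total + 26 else total
  let total := if flags.2.2.1 then total + 10 else total
  let total := if flags.2.2.2 then total + 32 else total
  total

-- ===== PRECONDITION & SPEC =====
def Spec_entropy_size (password : String) (out : Int) : Prop := out = entropy_size_alt password
instance (password : String) (out : Int) : Decidable (Spec_entropy_size password out) := by unfold Spec_entropy_size; infer_instance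

-- ===== CLAIM (what is proved, stated in full; the proofs are below) =====
def Claim_equal_entropy_size : Prop := ∀ (password : String), Dom_entropy_size password → Spec_entropy_size password (entropy_size password)

-- ===== LEMMAS AND PROOFS =====
theorem stepFlags_eq (st : Bool × Bool × Bool × Bool) (c : Char) :
    stepFlags st c
      = (st.1 || PySem.Chars.islower c, st.2.1 || PySem.Chars.isupper c,
         st.2.2.1 || PySem.Chars.isdigit c, st.2.2.2 || !PySem.Chars.isalnum c) := by
  unfold stepFlags
  cases PySem.Chars.islower c <;> cases PySem.Chars.isupper c <;>
    cases PySem.Chars.isdigit c <;> cases PySem.Chars.isalnum c <;> simp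

-- the fold's state after the whole list = "or of any" of each predicate
theorem flags_fold (l : List Char) (a b c d : Bool) :
    l.foldl stepFlags (a, b, c, d)
    = (a || l.any (fun x => PySem.Chars.islower x),
       b || l.any (fun x => PySem.Chars.isupper x),
       c || l.any (fun x => PySem.Chars.isdigit x),
       d || l.any (fun x => !PySem.Chars.isalnum x)) := by
  induction l generalizing a b c d with
  | nil => simp
  | cons x xs ih =>
    simp only [List.foldl_cons, List.any_cons, stepFlags_eq]
    rw [ih]
    simp [Bool.or_assoc]

-- ===== VERDICT (by name: the statement is the Claim_ definition above) =====
theorem entropy_size_spec : Claim_equal_entropy_size := by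
  intro password _
  unfold Spec_entropy_size entropy_size entropy_size_alt
  rw [flags_fold]
  simp
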